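-- pv_equiv track=rewrite | github.com/dutchLuck/webtime | write_config.py | obtain_usage
-- ===== SOURCE A (Python) =====
-- def obtain_usage(data):
--     lines_usage = []
--     shorts =[]
--
--     lines_usage.append('void  usage( struct config *  opt, char *  exeName )  {')
--     lines_usage.append('  printf( "Usage:\\n");')
--     shorts.append('  printf( " %s ')
--     for value in data.values():
--         config_type = value.get('type')
--         if config_type == 'optFlg':
--             shorts.append(f"[-{value.get('short', '')}]")
--         elif config_type == 'optInt':
--             shorts.append(f"[-{value.get('short', '')} INT]")
--         elif config_type == 'optStr':
--             shorts.append(f"[-{value.get('short', '')} TXT]")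
--         elif config_type == 'optLng':
--             shorts.append(f"[-{value.get('short', '')} INT]")
--         elif config_type == 'optDbl':
--             shorts.append(f"[-{value.get('short', '')} DBL]")
--         elif config_type == 'optChr':
--             shorts.append(f"[-{value.get('short', '')} CHR]")
--         elif config_type == 'positionParam': {}
--         else:
--             shorts.append(f"[-{value.get('short', '')}]")
--     for value in data.values():
--         config_type = value.get('type')
--         if config_type == 'positionParam':
--             shorts.append(f" {value.get('name', '')}")
--     shorts.append('\\n", exeName );')
--     lines_usage.append( ''.join(shorts))
--     for key, value in data.items():
--         config_type = value.get('type')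
--         if config_type != 'positionParam':
--             short = value.get('short', 'N/A')
--             lines_usage.append(f'  printf( " %s %s\\n", opt->{short}.optID, opt->{short}.helpStr ); /* {key} */')
--     for key, value in data.items():
--         config_type = value.get('type')
--         if config_type == 'positionParam':
--             short = value.get('name', 'N/A')
--             lines_usage.append(f'  printf( " %s %s\\n", \"{value.get("name", "")}\", \"{value.get("help", "")}\" ); /* {key} */')
--     return lines_usage
-- ===== SOURCE B (Python) =====
-- def obtain_usage(data):
--     # One pass over data.items(), classifying each entry into four ordered
--     # buckets; the usage lines are assembled afterwards.
--     SUFFIX = {'optFlg': ']', 'optInt': ' INT]', 'optStr': ' TXT]',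
--               'optLng': ' INT]', 'optDbl': ' DBL]', 'optChr': ' CHR]'}
--     shorts = []
--     posnames = []
--     opt_help = []
--     pos_help = []
--     for key, value in data.items():
--         t = value.get('type')
--         if t == 'positionParam':
--             posnames.append(f" {value.get('name', '')}")
--             pos_help.append(f'  printf( " %s %s\\n", "{value.get("name", "")}", "{value.get("help", "")}" ); /* {key} */')
--         else:
--             shorts.append(f"[-{value.get('short', '')}{SUFFIX.get(t, ']')}")
--             s = value.get('short', 'N/A')
--             opt_help.append(f'  printf( " %s %s\\n", opt->{s}.optID, opt->{s}.helpStr ); /* {key} */')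
--     return (['void  usage( struct config *  opt, char *  exeName )  {',
--              '  printf( "Usage:\\n");',
--              '  printf( " %s ' + ''.join(shorts) + ''.join(posnames) + '\\n", exeName );']
--             + opt_help + pos_help)
-- ===== Notes on version B (the rewrite author's own statement) =====
-- stated objective: simpler
-- what changed: Replaces A's four separate scans over the dict (short-option suffixes, position names, option help lines, position help lines) with one pass that classifies each entry once into four ordered buckets via a type-to-suffix table, assembling the result afterwards.
import Mathlib
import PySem

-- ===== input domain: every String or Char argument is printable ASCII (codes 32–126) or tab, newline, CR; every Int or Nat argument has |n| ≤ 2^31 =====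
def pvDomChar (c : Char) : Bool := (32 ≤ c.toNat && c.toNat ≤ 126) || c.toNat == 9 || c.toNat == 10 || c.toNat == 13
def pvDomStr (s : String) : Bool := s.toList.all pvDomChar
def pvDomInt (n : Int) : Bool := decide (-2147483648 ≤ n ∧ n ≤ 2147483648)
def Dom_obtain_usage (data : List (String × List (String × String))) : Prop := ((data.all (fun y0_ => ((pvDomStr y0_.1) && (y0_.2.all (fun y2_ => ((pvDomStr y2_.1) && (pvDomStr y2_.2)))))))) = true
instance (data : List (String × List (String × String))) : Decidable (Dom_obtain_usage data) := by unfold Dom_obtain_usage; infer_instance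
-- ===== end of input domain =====

-- B replaces A's four scans over the dict with one classifying pass into four
-- ordered buckets plus a type→suffix table (objective: simpler).

-- dict.get(k) / dict.get(k, d) on an inner dict (assoc list, first match)
def pvGet? (v : List (String × String)) (k : String) : Option String :=
  (v.find? (fun p => p.1 == k)).map (·.2)
def pvGetD (v : List (String × String)) (k d : String) : String :=
  (pvGet? v k).getD d

-- ===== PORT A =====
def obtain_usage (data : List (String × List (String × String))) : List String :=
  let lines_usage : List String := []
  let shorts : List String := []
  let lines_usage := lines_usage ++ ["void  usage( struct config *  opt, char *  exeName )  {"]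
  let lines_usage := lines_usage ++ ["  printf( \"Usage:\\n\");"]
  let shorts := shorts ++ ["  printf( \" %s "]
  let shorts := data.foldl (fun shorts kv =>
      let t := pvGet? kv.2 "type"
      if t == some "optFlg" then shorts ++ ["[-" ++ pvGetD kv.2 "short" "" ++ "]"]
      else if t == some "optInt" then shorts ++ ["[-" ++ pvGetD kv.2 "short" "" ++ " INT]"]
      else if t == some "optStr" then shorts ++ ["[-" ++ pvGetD kv.2 "short" "" ++ " TXT]"]
      else if t == some "optLng" then shorts ++ ["[-" ++ pvGetD kv.2 "short" "" ++ " INT]"]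
      else if t == some "optDbl" then shorts ++ ["[-" ++ pvGetD kv.2 "short" "" ++ " DBL]"]
      else if t == some "optChr" then shorts ++ ["[-" ++ pvGetD kv.2 "short" "" ++ " CHR]"]
      else if t == some "positionParam" then shorts
      else shorts ++ ["[-" ++ pvGetD kv.2 "short" "" ++ "]"]) shorts
  let shorts := data.foldl (fun shorts kv =>
      if pvGet? kv.2 "type" == some "positionParam" then
        shorts ++ [" " ++ pvGetD kv.2 "name" ""]
      else shorts) shorts
  let shorts := shorts ++ ["\\n\", exeName );"]
  let lines_usage := lines_usage ++ [PySem.Str.join "" shorts]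
  let lines_usage := data.foldl (fun lines_usage kv =>
      if pvGet? kv.2 "type" != some "positionParam" then
        let short := pvGetD kv.2 "short" "N/A"
        lines_usage ++ ["  printf( \" %s %s\\n\", opt->" ++ short ++ ".optID, opt->" ++ short ++ ".helpStr ); /* " ++ kv.1 ++ " */"]
      else lines_usage) lines_usage
  let lines_usage := data.foldl (fun lines_usage kv =>
      if pvGet? kv.2 "type" == some "positionParam" then
        lines_usage ++ ["  printf( \" %s %s\\n\", \"" ++ pvGetD kv.2 "name" "" ++ "\", \"" ++ pvGetD kv.2 "help" "" ++ "\" ); /* " ++ kv.1 ++ " */"]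
      else lines_usage) lines_usage
  lines_usage

-- ===== PORT B =====
def pvSuffix : PySem.Dict String String :=
  PySem.Dict.ofList [("optFlg", "]"), ("optInt", " INT]"), ("optStr", " TXT]"),
                     ("optLng", " INT]"), ("optDbl", " DBL]"), ("optChr", " CHR]")]

-- SUFFIX.get(t, ']') where t : Option String (None is never a key)
def pvSuffixGet (t : Option String) : String :=
  match t with
  | some s => pvSuffix.getD s "]"
  | none => "]"

def obtain_usage_alt (data : List (String × List (String × String))) : List String :=
  let acc := data.foldl
    (fun (acc : List String × List String × List String × List String) kv =>
      let t := pvGet? kv.2 "type"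
      if t == some "positionParam" then
        (acc.1,
         acc.2.1 ++ [" " ++ pvGetD kv.2 "name" ""],
         acc.2.2.1,
         acc.2.2.2 ++ ["  printf( \" %s %s\\n\", \"" ++ pvGetD kv.2 "name" "" ++ "\", \"" ++ pvGetD kv.2 "help" "" ++ "\" ); /* " ++ kv.1 ++ " */"])
      else
        let s := pvGetD kv.2 "short" "N/A"
        (acc.1 ++ ["[-" ++ pvGetD kv.2 "short" "" ++ pvSuffixGet t],
         acc.2.1,
         acc.2.2.1 ++ ["  printf( \" %s %s\\n\", opt->" ++ s ++ ".optID, opt->" ++ s ++ ".helpStr ); /* " ++ kv.1 ++ " */"],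
         acc.2.2.2))
    ([], [], [], [])
  ["void  usage( struct config *  opt, char *  exeName )  {",
   "  printf( \"Usage:\\n\");",
   "  printf( \" %s " ++ PySem.Str.join "" acc.1 ++ PySem.Str.join "" acc.2.1 ++ "\\n\", exeName );"]
  ++ acc.2.2.1 ++ acc.2.2.2

-- ===== PRECONDITION & SPEC =====
def Spec_obtain_usage (data : List (String × List (String × String))) (out : List String) : Prop := out = obtain_usage_alt data
instance (data : List (String × List (String × String))) (out : List String) : Decidable (Spec_obtain_usage data out) := by unfold Spec_obtain_usage; infer_instance

-- ===== CLAIM (what is proved, stated in full; the proofs are below) =====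
def Claim_equal_obtain_usage : Prop := ∀ (data : List (String × List (String × String))), Dom_obtain_usage data → Spec_obtain_usage data (obtain_usage data)

-- ===== LEMMAS AND PROOFS =====

-- per-entry contributions to the four buckets
def pvGS (kv : String × List (String × String)) : List String :=
  if pvGet? kv.2 "type" == some "positionParam" then []
  else ["[-" ++ pvGetD kv.2 "short" "" ++ pvSuffixGet (pvGet? kv.2 "type")]

def pvGP (kv : String × List (String × String)) : List String :=
  if pvGet? kv.2 "type" == some "positionParam" then [" " ++ pvGetD kv.2 "name" ""] else []

def pvGO (kv : String × List (String × String)) : List String :=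
  if pvGet? kv.2 "type" == some "positionParam" then []
  else ["  printf( \" %s %s\\n\", opt->" ++ pvGetD kv.2 "short" "N/A" ++ ".optID, opt->" ++ pvGetD kv.2 "short" "N/A" ++ ".helpStr ); /* " ++ kv.1 ++ " */"]

def pvGH (kv : String × List (String × String)) : List String :=
  if pvGet? kv.2 "type" == some "positionParam" then
    ["  printf( \" %s %s\\n\", \"" ++ pvGetD kv.2 "name" "" ++ "\", \"" ++ pvGetD kv.2 "help" "" ++ "\" ); /* " ++ kv.1 ++ " */"]
  else []

theorem foldl_step_append {α : Type} (f : List String → α → List String) (g : α → List String)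
    (h : ∀ acc x, f acc x = acc ++ g x) :
    ∀ (l : List α) (acc : List String), l.foldl f acc = acc ++ l.flatMap g := by
  intro l
  induction l with
  | nil => intro acc; simp
  | cons x xs ih => intro acc; simp [List.foldl_cons, h, ih]


theorem pvSuffix_eq : pvSuffix = PySem.Dict.mk
    [("optFlg", "]"), ("optInt", " INT]"), ("optStr", " TXT]"),
     ("optLng", " INT]"), ("optDbl", " DBL]"), ("optChr", " CHR]")] := by decide

theorem sfxFlg : pvSuffix.getD "optFlg" "]" = "]" := by decide
theorem sfxInt : pvSuffix.getD "optInt" "]" = " INT]" := by decide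
theorem sfxStr : pvSuffix.getD "optStr" "]" = " TXT]" := by decide
theorem sfxLng : pvSuffix.getD "optLng" "]" = " INT]" := by decide
theorem sfxDbl : pvSuffix.getD "optDbl" "]" = " DBL]" := by decide
theorem sfxChr : pvSuffix.getD "optChr" "]" = " CHR]" := by decide

theorem sfx_other (s : String) (h1 : s ≠ "optFlg") (h2 : s ≠ "optInt") (h3 : s ≠ "optStr")
    (h4 : s ≠ "optLng") (h5 : s ≠ "optDbl") (h6 : s ≠ "optChr") :
    pvSuffix.getD s "]" = "]" := by
  simp [PySem.Dict.getD, pvSuffix_eq, PySem.Dict.get?,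
        Ne.symm h1, Ne.symm h2, Ne.symm h3, Ne.symm h4, Ne.symm h5, Ne.symm h6]

theorem stepS_eq (acc : List String) (kv : String × List (String × String)) :
    (let t := pvGet? kv.2 "type"
      if t == some "optFlg" then acc ++ ["[-" ++ pvGetD kv.2 "short" "" ++ "]"]
      else if t == some "optInt" then acc ++ ["[-" ++ pvGetD kv.2 "short" "" ++ " INT]"]
      else if t == some "optStr" then acc ++ ["[-" ++ pvGetD kv.2 "short" "" ++ " TXT]"]
      else if t == some "optLng" then acc ++ ["[-" ++ pvGetD kv.2 "short" "" ++ " INT]"]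
      else if t == some "optDbl" then acc ++ ["[-" ++ pvGetD kv.2 "short" "" ++ " DBL]"]
      else if t == some "optChr" then acc ++ ["[-" ++ pvGetD kv.2 "short" "" ++ " CHR]"]
      else if t == some "positionParam" then acc
      else acc ++ ["[-" ++ pvGetD kv.2 "short" "" ++ "]"]) = acc ++ pvGS kv := by
  simp only [pvGS, pvSuffixGet]
  cases h : pvGet? kv.2 "type" with
  | none => simp
  | some s =>
    split_ifs with h1 h2 h3 h4 h5 h6 h7 <;>
      simp_all [sfxFlg, sfxInt, sfxStr, sfxLng, sfxDbl, sfxChr, sfx_other]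

theorem join_empty_append (a b : List String) :
    PySem.Str.join "" (a ++ b) = PySem.Str.join "" a ++ PySem.Str.join "" b := by
  have key : ∀ (l : List (List Char)), (List.intersperse ([] : List Char) l).flatten = l.flatten := by
    intro l
    induction l with
    | nil => rfl
    | cons x xs ih =>
      cases xs with
      | nil => rfl
      | cons y ys => simpa [List.intersperse] using ih
  simp [PySem.Str.join, PySem.Chars.join, List.intercalate, key]

theorem join_empty_singleton (x : String) : PySem.Str.join "" [x] = x := by
  simp [PySem.Str.join, PySem.Chars.join, List.intercalate]

theorem join_empty_cons (x : String) (l : List String) :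
    PySem.Str.join "" (x :: l) = x ++ PySem.Str.join "" l := by
  simpa [join_empty_singleton] using join_empty_append [x] l

theorem Bfold_eq (data : List (String × List (String × String)))
    (a b c d : List String) :
    data.foldl
      (fun (acc : List String × List String × List String × List String) kv =>
        let t := pvGet? kv.2 "type"
        if t == some "positionParam" then
          (acc.1,
           acc.2.1 ++ [" " ++ pvGetD kv.2 "name" ""],
           acc.2.2.1,
           acc.2.2.2 ++ ["  printf( \" %s %s\\n\", \"" ++ pvGetD kv.2 "name" "" ++ "\", \"" ++ pvGetD kv.2 "help" "" ++ "\" ); /* " ++ kv.1 ++ " */"])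
        else
          let s := pvGetD kv.2 "short" "N/A"
          (acc.1 ++ ["[-" ++ pvGetD kv.2 "short" "" ++ pvSuffixGet t],
           acc.2.1,
           acc.2.2.1 ++ ["  printf( \" %s %s\\n\", opt->" ++ s ++ ".optID, opt->" ++ s ++ ".helpStr ); /* " ++ kv.1 ++ " */"],
           acc.2.2.2))
      (a, b, c, d)
    = (a ++ data.flatMap pvGS, b ++ data.flatMap pvGP, c ++ data.flatMap pvGO, d ++ data.flatMap pvGH) := by
  induction data generalizing a b c d with
  | nil => simp
  | cons kv rest ih =>
    simp only [List.foldl_cons]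
    split <;> rename_i h <;> (rw [ih]; simp_all [pvGS, pvGP, pvGO, pvGH])

-- ===== VERDICT (by name: the statement is the Claim_ definition above) =====
theorem obtain_usage_spec : Claim_equal_obtain_usage := by
  intro data _
  unfold Spec_obtain_usage obtain_usage obtain_usage_alt
  simp only []
  rw [foldl_step_append _ pvGH (by
        intro acc kv
        simp only [pvGH]
        by_cases h : pvGet? kv.2 "type" == some "positionParam" <;> simp [h]),
      foldl_step_append _ pvGO (by
        intro acc kv
        simp only [pvGO]
        by_cases h : pvGet? kv.2 "type" == some "positionParam" <;> simp [h, bne]),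
      foldl_step_append _ pvGP (by
        intro acc kv
        simp only [pvGP]
        by_cases h : pvGet? kv.2 "type" == some "positionParam" <;> simp [h]),
      foldl_step_append _ pvGS stepS_eq,
      Bfold_eq]
  simp [join_empty_cons, join_empty_append,
    show PySem.Str.join "" [] = "" from rfl, String.append_empty,
    String.append_assoc]
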